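-- pv_equiv track=rewrite | github.com/jacksonhunter/vibereader-extension | scripts/convert_matrix.py | convert_to_variable_format
-- ===== SOURCE A (Python) =====
-- def convert_to_variable_format(css_content):
--     """Convert hardcoded colors to rgb(var()) format"""
--
--     # Common color mappings based on typical matrix theme colors
--     color_mappings = {
--         '#f92672': 'rgb(var(--primary-500))',
--         '#66d9ef': 'rgb(var(--secondary-500))',
--         '#ffbf80': 'rgb(var(--accent-500))',
--         'var(--primary)': 'rgb(var(--primary-500))',
--         'var(--secondary)': 'rgb(var(--secondary-500))',
--         'var(--accent)': 'rgb(var(--accent-500))',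
--         'var(--bg-primary)': 'rgb(var(--bg-primary))',
--         'var(--bg-secondary)': 'rgb(var(--bg-secondary))',
--         'var(--bg-tertiary)': 'rgb(var(--bg-tertiary))',
--         'var(--text-primary)': 'rgb(var(--text-primary))',
--         'var(--text-secondary)': 'rgb(var(--text-secondary))',
--         'var(--text-accent)': 'rgb(var(--text-accent))',
--         'var(--border-color)': 'rgb(var(--border-primary))',
--         'var(--glow-primary)': 'rgb(var(--glow-primary))',
--         'var(--glow-secondary)': 'rgb(var(--glow-secondary))',
--     }
--
--     for old_color, new_color in color_mappings.items():
--         css_content = css_content.replace(old_color, new_color)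
--
--     return css_content
-- ===== SOURCE B (Python) =====
-- def convert_to_variable_format(css_content):
--     """Convert hardcoded colors to rgb(var()) format (single left-to-right pass)"""
--
--     color_mappings = [
--         ('#f92672', 'rgb(var(--primary-500))'),
--         ('#66d9ef', 'rgb(var(--secondary-500))'),
--         ('#ffbf80', 'rgb(var(--accent-500))'),
--         ('var(--primary)', 'rgb(var(--primary-500))'),
--         ('var(--secondary)', 'rgb(var(--secondary-500))'),
--         ('var(--accent)', 'rgb(var(--accent-500))'),
--         ('var(--bg-primary)', 'rgb(var(--bg-primary))'),
--         ('var(--bg-secondary)', 'rgb(var(--bg-secondary))'),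
--         ('var(--bg-tertiary)', 'rgb(var(--bg-tertiary))'),
--         ('var(--text-primary)', 'rgb(var(--text-primary))'),
--         ('var(--text-secondary)', 'rgb(var(--text-secondary))'),
--         ('var(--text-accent)', 'rgb(var(--text-accent))'),
--         ('var(--border-color)', 'rgb(var(--border-primary))'),
--         ('var(--glow-primary)', 'rgb(var(--glow-primary))'),
--         ('var(--glow-secondary)', 'rgb(var(--glow-secondary))'),
--     ]
--
--     out = []
--     i = 0
--     n = len(css_content)
--     while i < n:
--         for old_color, new_color in color_mappings:
--             if css_content.startswith(old_color, i):
--                 out.append(new_color)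
--                 i += len(old_color)
--                 break
--         else:
--             out.append(css_content[i])
--             i += 1
--     return ''.join(out)
-- ===== Notes on version B (the rewrite author's own statement) =====
-- stated objective: alternative
-- what changed: A makes 15 sequential whole-string str.replace passes (one per mapping, each building a new string); B makes a single left-to-right pass that at each position emits the value of the first matching key (or the character), which is equivalent because the concrete keys/values never overlap or chain.
import Mathlib
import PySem

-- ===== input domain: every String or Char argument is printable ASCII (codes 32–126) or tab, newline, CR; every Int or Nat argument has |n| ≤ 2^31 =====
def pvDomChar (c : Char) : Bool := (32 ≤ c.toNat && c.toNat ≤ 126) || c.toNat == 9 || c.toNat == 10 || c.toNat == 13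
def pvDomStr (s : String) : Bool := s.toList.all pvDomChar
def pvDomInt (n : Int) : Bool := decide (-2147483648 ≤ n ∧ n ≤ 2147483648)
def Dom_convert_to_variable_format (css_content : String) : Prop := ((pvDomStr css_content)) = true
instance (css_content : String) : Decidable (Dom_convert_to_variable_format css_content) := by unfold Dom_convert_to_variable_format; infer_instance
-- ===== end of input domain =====

-- B replaces A's 15 sequential whole-string str.replace passes by ONE left-to-right scan that
-- resolves the first matching key at each position (objective: alternative single-pass algorithm).

-- ===== PORT A =====
-- Python dict literal (15 distinct keys, insertion order); A iterates .items() and replaces sequentially.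
def colorMappings : PySem.Dict String String :=
  ⟨[("#f92672", "rgb(var(--primary-500))"),
    ("#66d9ef", "rgb(var(--secondary-500))"),
    ("#ffbf80", "rgb(var(--accent-500))"),
    ("var(--primary)", "rgb(var(--primary-500))"),
    ("var(--secondary)", "rgb(var(--secondary-500))"),
    ("var(--accent)", "rgb(var(--accent-500))"),
    ("var(--bg-primary)", "rgb(var(--bg-primary))"),
    ("var(--bg-secondary)", "rgb(var(--bg-secondary))"),
    ("var(--bg-tertiary)", "rgb(var(--bg-tertiary))"),
    ("var(--text-primary)", "rgb(var(--text-primary))"),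
    ("var(--text-secondary)", "rgb(var(--text-secondary))"),
    ("var(--text-accent)", "rgb(var(--text-accent))"),
    ("var(--border-color)", "rgb(var(--border-primary))"),
    ("var(--glow-primary)", "rgb(var(--glow-primary))"),
    ("var(--glow-secondary)", "rgb(var(--glow-secondary))")]⟩

def convert_to_variable_format (css_content : String) : String :=
  colorMappings.items.foldl (fun s p => PySem.Str.replace s p.1 p.2) css_content

-- ===== PORT B =====
-- B's mapping list (same pairs, as a list, in the same order).
def pvMappings : List (String × String) :=
  [("#f92672", "rgb(var(--primary-500))"),
   ("#66d9ef", "rgb(var(--secondary-500))"),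
   ("#ffbf80", "rgb(var(--accent-500))"),
   ("var(--primary)", "rgb(var(--primary-500))"),
   ("var(--secondary)", "rgb(var(--secondary-500))"),
   ("var(--accent)", "rgb(var(--accent-500))"),
   ("var(--bg-primary)", "rgb(var(--bg-primary))"),
   ("var(--bg-secondary)", "rgb(var(--bg-secondary))"),
   ("var(--bg-tertiary)", "rgb(var(--bg-tertiary))"),
   ("var(--text-primary)", "rgb(var(--text-primary))"),
   ("var(--text-secondary)", "rgb(var(--text-secondary))"),
   ("var(--text-accent)", "rgb(var(--text-accent))"),
   ("var(--border-color)", "rgb(var(--border-primary))"),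
   ("var(--glow-primary)", "rgb(var(--glow-primary))"),
   ("var(--glow-secondary)", "rgb(var(--glow-secondary))")]

def pvPairsB : List (List Char × List Char) :=
  pvMappings.map (fun p => (p.1.toList, p.2.toList))

-- Source B's while-loop: at position i try the keys in order; on a match emit the value and jump
-- over the key, otherwise emit the character and advance by one.  (The nonempty-keys proof
-- argument only justifies termination.)
def pvScan (ms : List (List Char × List Char)) (hne : ∀ p ∈ ms, 0 < p.1.length) :
    List Char → List Char
  | [] => []
  | c :: t =>
    match h : ms.find? (fun p => p.1.isPrefixOf (c :: t)) with
    | some p => p.2 ++ pvScan ms hne (List.drop p.1.length (c :: t))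
    | none => c :: pvScan ms hne t
termination_by s => s.length
decreasing_by
  · have hp := hne p (List.mem_of_find?_eq_some h)
    simp only [List.length_drop, List.length_cons]
    omega
  · simp

def convert_to_variable_format_alt (css_content : String) : String :=
  String.ofList (pvScan pvPairsB (by decide) css_content.toList)

-- ===== PRECONDITION & SPEC =====
def Spec_convert_to_variable_format (css_content : String) (out : String) : Prop := out = convert_to_variable_format_alt css_content
instance (css_content : String) (out : String) : Decidable (Spec_convert_to_variable_format css_content out) := by unfold Spec_convert_to_variable_format; infer_instance

-- ===== CLAIM (what is proved, stated in full; the proofs are below) =====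
def Claim_equal_convert_to_variable_format : Prop := ∀ (css_content : String), Dom_convert_to_variable_format css_content → Spec_convert_to_variable_format css_content (convert_to_variable_format css_content)

-- ===== LEMMAS AND PROOFS =====

-- Non-interference between a pair (k, v) and every LATER pair p of the mapping list:
--   (i)  no nonempty suffix of v is prefix-comparable with a later key   (v is scanned verbatim),
--   (ii) no nonempty suffix of a later key is prefix-comparable with v   (no hybrid match into an inserted v),
--   (iii) no nonempty proper suffix of a later key is prefix-comparable with k
--        (a replace of k never destroys or creates an occurrence of a later key).
def pvRel (x y : List Char × List Char) : Bool :=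
  (x.2.tails.all fun b => b.isEmpty || (!(y.1.isPrefixOf b) && !(b.isPrefixOf y.1))) &&
  (y.1.tails.all fun b => b.isEmpty || (!(b.isPrefixOf x.2) && !(x.2.isPrefixOf b))) &&
  (y.1.tails.all fun b => b.isEmpty || b == y.1 || (!(x.1.isPrefixOf b) && !(b.isPrefixOf x.1)))

lemma pvRel_spec (x y : List Char × List Char) (h : pvRel x y = true) :
    (∀ b, b <:+ x.2 → b ≠ [] → ¬ y.1 <+: b ∧ ¬ b <+: y.1) ∧
    (∀ b, b <:+ y.1 → b ≠ [] → ¬ b <+: x.2 ∧ ¬ x.2 <+: b) ∧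
    (∀ b, b <:+ y.1 → b ≠ [] → b ≠ y.1 → ¬ x.1 <+: b ∧ ¬ b <+: x.1) := by
  simp only [pvRel, Bool.and_eq_true, List.all_eq_true] at h
  obtain ⟨⟨h1, h2⟩, h3⟩ := h
  refine ⟨?_, ?_, ?_⟩
  · intro b hb hbne
    have := h1 b ((List.mem_tails b x.2).mpr hb)
    simpa [List.isEmpty_iff, hbne, ← Bool.not_eq_true, List.isPrefixOf_iff_prefix] using this
  · intro b hb hbne
    have := h2 b ((List.mem_tails b y.1).mpr hb)
    simpa [List.isEmpty_iff, hbne, ← Bool.not_eq_true, List.isPrefixOf_iff_prefix] using this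
  · intro b hb hbne hbprop
    have := h3 b ((List.mem_tails b y.1).mpr hb)
    simpa [List.isEmpty_iff, hbne, hbprop, ← Bool.not_eq_true, List.isPrefixOf_iff_prefix] using this

-- A left-to-right single-key replace, the recursion Chars.replace.go implements.
def pvRepl (k v : List Char) (hk : 0 < k.length) : List Char → List Char
  | [] => []
  | c :: t =>
    if k.isPrefixOf (c :: t) then v ++ pvRepl k v hk (List.drop k.length (c :: t))
    else c :: pvRepl k v hk t
termination_by s => s.length
decreasing_by
  · simp only [List.length_drop, List.length_cons]
    omega
  · simp

lemma pvRepl_nil (k v : List Char) (hk : 0 < k.length) : pvRepl k v hk [] = [] := by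
  rw [pvRepl]

lemma pvRepl_cons_pos (k v : List Char) (hk : 0 < k.length) (c : Char) (t : List Char)
    (h : k <+: (c :: t)) :
    pvRepl k v hk (c :: t) = v ++ pvRepl k v hk (List.drop k.length (c :: t)) := by
  rw [pvRepl, if_pos (List.isPrefixOf_iff_prefix.mpr h)]

lemma pvRepl_cons_neg (k v : List Char) (hk : 0 < k.length) (c : Char) (t : List Char)
    (h : ¬ k <+: (c :: t)) :
    pvRepl k v hk (c :: t) = c :: pvRepl k v hk t := by
  rw [pvRepl, if_neg (fun hb => h (List.isPrefixOf_iff_prefix.mp hb))]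

lemma pvGo_eq (k v : List Char) (hk : 0 < k.length) :
    ∀ (fuel : Nat) (s acc : List Char), s.length ≤ fuel →
      PySem.Chars.replace.go k v fuel s acc = acc.reverse ++ pvRepl k v hk s := by
  intro fuel
  induction fuel with
  | zero =>
    intro s acc hs
    have : s = [] := by cases s <;> simp_all
    subst this
    rw [PySem.Chars.replace.go, pvRepl_nil]
  | succ n ih =>
    intro s acc hs
    cases s with
    | nil =>
      rw [PySem.Chars.replace.go, pvRepl_nil]
      all_goals simp
    | cons c t =>
      rw [PySem.Chars.replace.go]
      by_cases h : k <+: (c :: t)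
      · rw [if_pos (List.isPrefixOf_iff_prefix.mpr h)]
        rw [ih (List.drop k.length (c :: t)) (v.reverse ++ acc)
            (by simp only [List.length_drop, List.length_cons]; simp at hs; omega)]
        rw [pvRepl_cons_pos k v hk c t h]
        simp
      · rw [if_neg (fun hb => h (List.isPrefixOf_iff_prefix.mp hb))]
        rw [ih t (c :: acc) (by simp at hs ⊢; omega)]
        rw [pvRepl_cons_neg k v hk c t h]
        simp

lemma pvReplace_eq (k v : List Char) (hk : 0 < k.length) (s : List Char) :
    PySem.Chars.replace s k v = pvRepl k v hk s := by
  have hke : k.isEmpty = false := by cases k with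
    | nil => simp at hk
    | cons a l => simp
  rw [PySem.Chars.replace, hke]
  simpa using pvGo_eq k v hk s.length s [] le_rfl

lemma pvScan_nil (ms : List (List Char × List Char)) (hne : ∀ p ∈ ms, 0 < p.1.length) :
    pvScan ms hne [] = [] := by
  rw [pvScan]

lemma pvScan_cons_some (ms : List (List Char × List Char)) (hne : ∀ p ∈ ms, 0 < p.1.length)
    (c : Char) (t : List Char) (q : List Char × List Char)
    (h : ms.find? (fun p => p.1.isPrefixOf (c :: t)) = some q) :
    pvScan ms hne (c :: t) = q.2 ++ pvScan ms hne (List.drop q.1.length (c :: t)) := by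
  rw [pvScan]
  split <;> simp_all

lemma pvScan_cons_none (ms : List (List Char × List Char)) (hne : ∀ p ∈ ms, 0 < p.1.length)
    (c : Char) (t : List Char)
    (h : ms.find? (fun p => p.1.isPrefixOf (c :: t)) = none) :
    pvScan ms hne (c :: t) = c :: pvScan ms hne t := by
  rw [pvScan]
  split <;> simp_all

lemma pvScan_of_find?_some (ms : List (List Char × List Char)) (hne : ∀ p ∈ ms, 0 < p.1.length)
    (s : List Char) (q : List Char × List Char) (hs : s ≠ [])
    (h : ms.find? (fun p => p.1.isPrefixOf s) = some q) :
    pvScan ms hne s = q.2 ++ pvScan ms hne (s.drop q.1.length) := by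
  cases s with
  | nil => exact absurd rfl hs
  | cons c t => exact pvScan_cons_some ms hne c t q h

lemma pvScan_empty (hne : ∀ p ∈ ([] : List (List Char × List Char)), 0 < p.1.length) :
    ∀ s, pvScan [] hne s = s := by
  intro s
  induction s with
  | nil => exact pvScan_nil _ _
  | cons c t ih => rw [pvScan_cons_none _ _ _ _ (by simp), ih]

-- (i): scanning an inserted value v emits it verbatim, whatever follows.
lemma pvScan_emit (ms : List (List Char × List Char)) (hne : ∀ p ∈ ms, 0 < p.1.length)
    (v : List Char)
    (hsafe : ∀ p ∈ ms, ∀ b, b <:+ v → b ≠ [] → ¬ p.1 <+: b ∧ ¬ b <+: p.1) :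
    ∀ X, pvScan ms hne (v ++ X) = v ++ pvScan ms hne X := by
  induction v with
  | nil => simp
  | cons c v' ih =>
    intro X
    have hnone : ms.find? (fun p => p.1.isPrefixOf (c :: (v' ++ X))) = none := by
      rw [List.find?_eq_none]
      intro p hp
      simp only [List.isPrefixOf_iff_prefix]
      intro hpre
      have : (c :: v') ++ X = c :: (v' ++ X) := by simp
      rw [← this] at hpre
      rcases List.prefix_or_prefix_of_prefix hpre (List.prefix_append (c :: v') X) with h1 | h1
      · exact (hsafe p hp (c :: v') (List.suffix_refl _) (by simp)).1 h1
      · exact (hsafe p hp (c :: v') (List.suffix_refl _) (by simp)).2 h1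
    have : (c :: v') ++ X = c :: (v' ++ X) := by simp
    rw [this, pvScan_cons_none ms hne _ _ hnone,
        ih (fun p hp b hb hbne => hsafe p hp b (hb.trans (List.suffix_cons c v')) hbne) X]
    simp

-- (ii)+(iii) in action: replacing k by v never creates a NEW occurrence of a string b
-- (a suffix of a later key) at the front.
lemma pvRepl_no_new (k v : List Char) (hk : 0 < k.length) (k'' : List Char)
    (hsafe : ∀ b, b <:+ k'' → b ≠ [] → ¬ b <+: v ∧ ¬ v <+: b) :
    ∀ s b, b <:+ k'' → b ≠ [] → ¬ b <+: s → ¬ b <+: pvRepl k v hk s := by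
  intro s
  induction s with
  | nil =>
    intro b hb hbne hbs
    rw [pvRepl_nil]
    simpa [List.prefix_nil] using hbne
  | cons c t ih =>
    intro b hb hbne hbs
    by_cases hp : k <+: (c :: t)
    · rw [pvRepl_cons_pos k v hk c t hp]
      intro hpre
      rcases List.prefix_or_prefix_of_prefix hpre (List.prefix_append v _) with h1 | h1
      · exact (hsafe b hb hbne).1 h1
      · exact (hsafe b hb hbne).2 h1
    · rw [pvRepl_cons_neg k v hk c t hp]
      intro hpre
      cases b with
      | nil => exact hbne rfl
      | cons d b' =>
        rw [List.cons_prefix_cons] at hpre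
        obtain ⟨rfl, hb'⟩ := hpre
        cases b' with
        | nil => exact hbs (by simp)
        | cons e b'' =>
          have hbs' : ¬ (e :: b'') <+: t := by
            intro hx
            exact hbs (List.cons_prefix_cons.mpr ⟨rfl, hx⟩)
          exact ih (e :: b'') ((List.suffix_cons d (e :: b'')).trans hb) (by simp) hbs' hb'

-- If k occurs nowhere in the first n characters, pvRepl copies them.
lemma pvRepl_skip (k v : List Char) (hk : 0 < k.length) :
    ∀ (n : Nat) (s : List Char), n ≤ s.length → (∀ j, j < n → ¬ k <+: s.drop j) →
      pvRepl k v hk s = s.take n ++ pvRepl k v hk (s.drop n) := by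
  intro n
  induction n with
  | zero => simp
  | succ n ih =>
    intro s hlen hj
    cases s with
    | nil => simp at hlen
    | cons c t =>
      have h0 : ¬ k <+: (c :: t) := by simpa using hj 0 (Nat.succ_pos n)
      rw [pvRepl_cons_neg k v hk c t h0, List.take_succ_cons, List.drop_succ_cons,
          ih t (by simpa using hlen) (fun j hjn => by simpa using hj (j + 1) (by omega))]
      simp

-- The first matching pair for s is still the first matching pair for k' ++ Y (k' its key).
lemma pvFind_append (m' : List (List Char × List Char)) (s k' : List Char)
    (q : List Char × List Char) (Y : List Char)
    (hq : q.1 = k')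
    (hk's : k' <+: s)
    (hpf : ∀ p ∈ m', p.1 ≠ k' → ¬ k' <+: p.1)
    (hfind : m'.find? (fun p => p.1.isPrefixOf s) = some q) :
    m'.find? (fun p => p.1.isPrefixOf (k' ++ Y)) = some q := by
  induction m' with
  | nil => simp at hfind
  | cons a m'' ih =>
    by_cases h : a.1 <+: s
    · have hcp : List.find? (fun p => p.1.isPrefixOf s) (a :: m'') = some a :=
        List.find?_cons_of_pos (List.isPrefixOf_iff_prefix.mpr h)
      rw [hcp] at hfind
      injection hfind with hfind
      subst hfind
      exact List.find?_cons_of_pos (by rw [List.isPrefixOf_iff_prefix, hq]; exact List.prefix_append k' Y)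
    · have hcn : List.find? (fun p => p.1.isPrefixOf s) (a :: m'') =
          List.find? (fun p => p.1.isPrefixOf s) m'' :=
        List.find?_cons_of_neg (by simpa [List.isPrefixOf_iff_prefix] using h)
      rw [hcn] at hfind
      have hcn2 : List.find? (fun p => p.1.isPrefixOf (k' ++ Y)) (a :: m'') =
          List.find? (fun p => p.1.isPrefixOf (k' ++ Y)) m'' := by
        apply List.find?_cons_of_neg
        simp only [List.isPrefixOf_iff_prefix]
        intro hpre
        rcases List.prefix_or_prefix_of_prefix hpre (List.prefix_append k' Y) with h1 | h1
        · exact h (h1.trans hk's)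
        · by_cases he : a.1 = k'
          · exact h (he ▸ hk's)
          · exact hpf a List.mem_cons_self he h1
      rw [hcn2]
      exact ih (fun p hp => hpf p (List.mem_cons_of_mem a hp)) hfind

-- Core step: prepending the pair (k, v) to the scan list is the same as first doing the
-- whole-string replace of k by v and then scanning with the remaining pairs.
lemma pvStep (k v : List Char) (hk : 0 < k.length) (m' : List (List Char × List Char))
    (hcons : ∀ p ∈ (k, v) :: m', 0 < p.1.length) (hne' : ∀ p ∈ m', 0 < p.1.length)
    (hrel : ∀ p ∈ m', pvRel (k, v) p = true)
    (hpf : ∀ p ∈ m', ∀ q ∈ m', p.1 ≠ q.1 → ¬ p.1 <+: q.1) :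
    ∀ (N : Nat) (s : List Char), s.length ≤ N →
      pvScan ((k, v) :: m') hcons s = pvScan m' hne' (pvRepl k v hk s) := by
  intro N
  induction N with
  | zero =>
    intro s hs
    have : s = [] := by cases s <;> simp_all
    subst this
    rw [pvRepl_nil, pvScan_nil, pvScan_nil]
  | succ N ih =>
    intro s hs
    cases s with
    | nil => rw [pvRepl_nil, pvScan_nil, pvScan_nil]
    | cons c t =>
      by_cases hp : k <+: (c :: t)
      · have hfind : ((k, v) :: m').find? (fun p => p.1.isPrefixOf (c :: t)) = some (k, v) :=
          List.find?_cons_of_pos (List.isPrefixOf_iff_prefix.mpr hp)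
        rw [pvScan_cons_some _ _ _ _ _ hfind, pvRepl_cons_pos k v hk c t hp]
        have hsafe : ∀ p ∈ m', ∀ b, b <:+ v → b ≠ [] → ¬ p.1 <+: b ∧ ¬ b <+: p.1 := by
          intro p hpm b hb hbne
          exact (pvRel_spec (k, v) p (hrel p hpm)).1 b hb hbne
        rw [pvScan_emit m' hne' v hsafe]
        congr 1
        exact ih (List.drop k.length (c :: t))
          (by simp only [List.length_drop, List.length_cons]; simp at hs; omega)
      · cases hm : m'.find? (fun p => p.1.isPrefixOf (c :: t)) with
        | none =>
          have hfind : ((k, v) :: m').find? (fun p => p.1.isPrefixOf (c :: t)) = none := by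
            rw [List.find?_cons_of_neg (by simpa [List.isPrefixOf_iff_prefix] using hp)]
            exact hm
          rw [pvScan_cons_none _ _ _ _ hfind, pvRepl_cons_neg k v hk c t hp]
          have hnone2 : m'.find? (fun p => p.1.isPrefixOf (c :: pvRepl k v hk t)) = none := by
            rw [List.find?_eq_none]
            intro p hpm
            simp only [List.isPrefixOf_iff_prefix]
            have hps : ¬ p.1 <+: (c :: t) := by
              have := List.find?_eq_none.mp hm p hpm
              simpa [List.isPrefixOf_iff_prefix] using this
            have hsafe : ∀ b, b <:+ p.1 → b ≠ [] → ¬ b <+: v ∧ ¬ v <+: b := by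
              intro b hb hbne
              exact (pvRel_spec (k, v) p (hrel p hpm)).2.1 b hb hbne
            have hne1 : p.1 ≠ [] := by
              have := hne' p hpm
              intro h0
              rw [h0] at this
              simp at this
            have := pvRepl_no_new k v hk p.1 hsafe (c :: t) p.1 (List.suffix_refl _) hne1 hps
            rwa [pvRepl_cons_neg k v hk c t hp] at this
          rw [pvScan_cons_none _ _ _ _ hnone2]
          congr 1
          exact ih t (by simp at hs; omega)
        | some q =>
          have hq1s : q.1 <+: (c :: t) := by
            simpa [List.isPrefixOf_iff_prefix] using List.find?_some hm
          have hqmem := List.mem_of_find?_eq_some hm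
          have hq1 : 0 < q.1.length := hne' q hqmem
          have hfind : ((k, v) :: m').find? (fun p => p.1.isPrefixOf (c :: t)) = some q := by
            rw [List.find?_cons_of_neg (by simpa [List.isPrefixOf_iff_prefix] using hp)]
            exact hm
          rw [pvScan_cons_some _ _ _ _ _ hfind]
          obtain ⟨rest, hrest⟩ := hq1s
          have hdrop : List.drop q.1.length (c :: t) = rest := by
            rw [← hrest, List.drop_left]
          have hskip : pvRepl k v hk (c :: t) = q.1 ++ pvRepl k v hk rest := by
            have hj : ∀ j, j < q.1.length → ¬ k <+: (c :: t).drop j := by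
              intro j hjlt
              cases Nat.eq_zero_or_pos j with
              | inl h0 => subst h0; simpa using hp
              | inr hj0 =>
                have hjle : j ≤ q.1.length := Nat.le_of_lt hjlt
                have : (c :: t).drop j = q.1.drop j ++ rest := by
                  rw [← hrest, List.drop_append_of_le_length hjle]
                rw [this]
                intro hkpre
                have hbsuf : q.1.drop j <:+ q.1 := List.drop_suffix j q.1
                have hbne : q.1.drop j ≠ [] := by
                  intro h0
                  have := congrArg List.length h0
                  simp at this
                  omega
                have hbprop : q.1.drop j ≠ q.1 := by
                  intro h0
                  have := congrArg List.length h0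
                  simp at this
                  omega
                have hc3 := (pvRel_spec (k, v) q (hrel q hqmem)).2.2 (q.1.drop j)
                  hbsuf hbne hbprop
                rcases List.prefix_or_prefix_of_prefix hkpre
                  (List.prefix_append (q.1.drop j) rest) with h1 | h1
                · exact hc3.1 h1
                · exact hc3.2 h1
            have hlen : q.1.length ≤ (c :: t).length := by
              rw [← hrest]; simp
            rw [pvRepl_skip k v hk q.1.length (c :: t) hlen hj, hdrop, ← hrest, List.take_left]
          rw [hskip]
          have hfind2 : m'.find? (fun p => p.1.isPrefixOf (q.1 ++ pvRepl k v hk rest)) = some q :=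
            pvFind_append m' (c :: t) q.1 q (pvRepl k v hk rest) rfl ⟨rest, hrest⟩
              (fun p hpm hne => hpf q hqmem p hpm (fun he => hne he.symm))
              hm
          have hq1ne : q.1 ++ pvRepl k v hk rest ≠ [] := by
            intro h0
            have hl := congrArg List.length h0
            simp only [List.length_append, List.length_nil] at hl
            omega
          rw [pvScan_of_find?_some m' hne' _ q hq1ne hfind2, List.drop_left]
          congr 1
          rw [hdrop]
          exact ih rest (by
            have hlen2 : (c :: t).length = q.1.length + rest.length := by
              rw [← hrest]; simp
            simp only [List.length_cons] at hlen2 hs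
            omega)

-- The sequential fold of replaces equals the single scan, given pairwise non-interference.
lemma pvMain : ∀ (m : List (List Char × List Char)) (hne : ∀ p ∈ m, 0 < p.1.length),
    List.Pairwise (fun x y => pvRel x y = true) m → (∀ p ∈ m, ∀ q ∈ m, p.1 ≠ q.1 → ¬ p.1 <+: q.1) →
    ∀ s, m.foldl (fun t p => PySem.Chars.replace t p.1 p.2) s = pvScan m hne s := by
  intro m
  induction m with
  | nil => intro hne _ _ s; simpa using (pvScan_empty hne s).symm
  | cons kv m' ih =>
    intro hne hg hpf s
    obtain ⟨k, v⟩ := kv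
    have hk : 0 < k.length := hne (k, v) List.mem_cons_self
    have hne' : ∀ p ∈ m', 0 < p.1.length := fun p hp => hne p (List.mem_cons_of_mem _ hp)
    obtain ⟨hrel, hg'⟩ := List.pairwise_cons.mp hg
    have hpf' : ∀ p ∈ m', ∀ q ∈ m', p.1 ≠ q.1 → ¬ p.1 <+: q.1 := fun p hp q hq =>
      hpf p (List.mem_cons_of_mem _ hp) q (List.mem_cons_of_mem _ hq)
    rw [List.foldl_cons, ih hne' hg' hpf' (PySem.Chars.replace s k v), pvReplace_eq k v hk s]
    exact (pvStep k v hk m' hne hne' hrel hpf' s.length s le_rfl).symm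

lemma pvFoldBridge : ∀ (l : List (String × String)) (s : String),
    (l.foldl (fun t p => PySem.Str.replace t p.1 p.2) s).toList
      = (l.map (fun p => (p.1.toList, p.2.toList))).foldl
          (fun t p => PySem.Chars.replace t p.1 p.2) s.toList := by
  intro l
  induction l with
  | nil => intro s; simp
  | cons p l ih =>
    intro s
    simp only [List.map_cons, List.foldl_cons]
    rw [ih (PySem.Str.replace s p.1 p.2), PySem.Str.toList_replace]

-- ===== VERDICT (by name: the statement is the Claim_ definition above) =====
theorem convert_to_variable_format_spec : Claim_equal_convert_to_variable_format := by
  intro css_content _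
  unfold Spec_convert_to_variable_format
  apply String.toList_inj.mp
  rw [convert_to_variable_format, convert_to_variable_format_alt, String.toList_ofList,
      pvFoldBridge]
  have hmap : colorMappings.items.map (fun p => (p.1.toList, p.2.toList)) = pvPairsB := by decide
  rw [hmap]
  exact pvMain pvPairsB (by decide) (by decide) (by decide) css_content.toList
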